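-- pv_equiv track=rewrite | github.com/Gist-Algorithm-Study-We-keep-learning/Gist-Algorithm-Study-We-keep-learning.github.io | PythonPractice_jimin/BOJ9012_jimin1st.py | count
-- ===== SOURCE A (Python) =====
-- def count(arr):
--     cnt1 = 0
--     cnt2 = 0
--     for chr in arr:
--         if chr == '(':
--             cnt1 += 1
--         else:
--             cnt2 += 1
--         if cnt2 > cnt1:
--             break
--     if cnt2 > cnt1:
--         return True
-- ===== SOURCE B (Python) =====
-- def count(arr):
--     # stack reduction: a non-'(' cancels a '(' on top, otherwise sticks forever;
--     # True iff an uncancelled non-'(' remains after reducing the whole list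
--     stack = []
--     for c in arr:
--         if c != '(' and stack and stack[-1] == '(':
--             stack.pop()
--         else:
--             stack.append(c)
--     if any(c != '(' for c in stack):
--         return True
-- ===== Notes on version B (the rewrite author's own statement) =====
-- stated objective: alternative
-- what changed: Replaces the two running counters with an early break by a stack reduction: each non-'(' element cancels a '(' on top of an explicit stack or else is pushed permanently, and the answer is whether any non-'(' survives the full reduction.
import Mathlib
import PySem

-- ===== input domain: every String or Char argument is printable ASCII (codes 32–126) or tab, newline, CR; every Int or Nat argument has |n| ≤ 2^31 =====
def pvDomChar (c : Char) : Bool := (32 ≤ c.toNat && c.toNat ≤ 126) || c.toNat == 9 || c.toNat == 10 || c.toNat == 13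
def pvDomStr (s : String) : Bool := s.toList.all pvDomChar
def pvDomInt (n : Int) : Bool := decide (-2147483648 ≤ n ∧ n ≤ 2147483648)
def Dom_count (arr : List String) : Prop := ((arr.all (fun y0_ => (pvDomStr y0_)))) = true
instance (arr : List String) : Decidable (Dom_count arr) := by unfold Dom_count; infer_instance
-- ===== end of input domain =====

-- B replaces A's counters-with-early-break by a stack reduction (non-'(' cancels a '(' on top or sticks forever); same values everywhere (alternative algorithm).

-- ===== PORT A =====
def countLoop : List String → Int → Int → Option Bool
  | [], cnt1, cnt2 => if cnt2 > cnt1 then some true else none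
  | c :: rest, cnt1, cnt2 =>
    let cnt1' := if c == "(" then cnt1 + 1 else cnt1
    let cnt2' := if c == "(" then cnt2 else cnt2 + 1
    if cnt2' > cnt1' then some true else countLoop rest cnt1' cnt2'

def count (arr : List String) : Option Bool := countLoop arr 0 0

-- ===== PORT B =====
def count_altStep (st : List String) (c : String) : List String :=
  if c != "(" && st.getLast? == some "(" then st.dropLast else st ++ [c]

def count_alt (arr : List String) : Option Bool :=
  let stack := arr.foldl count_altStep []
  if stack.any (fun x => x != "(") then some true else none

-- ===== PRECONDITION & SPEC =====
def Spec_count (arr : List String) (out : Option Bool) : Prop := out = count_alt arr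
instance (arr : List String) (out : Option Bool) : Decidable (Spec_count arr out) := by unfold Spec_count; infer_instance

-- ===== CLAIM =====
def Claim_equal_count : Prop := ∀ (arr : List String), Dom_count arr → Spec_count arr (count arr)

-- ===== LEMMAS AND PROOFS =====

-- does some prefix balance, started at b, go negative?
def negPrefix : List String → Int → Bool
  | [], _ => false
  | c :: rest, b =>
    let b' := b + (if c == "(" then (1 : Int) else -1)
    (decide (b' < 0)) || negPrefix rest b'

theorem countLoop_eq_negPrefix (arr : List String) :
    ∀ cnt1 cnt2 : Int, cnt2 ≤ cnt1 →
      countLoop arr cnt1 cnt2 = if negPrefix arr (cnt1 - cnt2) then some true else none := by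
  induction arr with
  | nil =>
    intro c1 c2 h
    simp [countLoop, negPrefix]
    omega
  | cons c rest ih =>
    intro c1 c2 h
    by_cases hc : (c == "(") = true
    · have hne : ¬ (c2 > c1 + 1) := by omega
      have hb : ¬ (c1 - c2 + 1 < 0) := by omega
      have he : c1 + 1 - c2 = c1 - c2 + 1 := by ring
      simp only [countLoop, negPrefix, hc, if_pos, if_neg hne,
        ih _ _ (by omega : c2 ≤ c1 + 1), he, Bool.or_eq_true, decide_eq_true_eq]
      simp [hb]
    · have he : c1 - (c2 + 1) = c1 - c2 + -1 := by ring
      by_cases hgt : c2 + 1 > c1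
      · have hb : c1 - c2 + -1 < 0 := by omega
        simp [countLoop, negPrefix, hc, hgt, hb]
      · have hb : ¬ (c1 - c2 + -1 < 0) := by omega
        simp only [countLoop, negPrefix, hc, Bool.false_eq_true, if_false,
          if_neg hgt, ih _ _ (by omega : c2 + 1 ≤ c1), he, Bool.or_eq_true, decide_eq_true_eq]
        simp [hb]

-- invariant: the stack is always (stuck closers) ++ (replicate k "("), and a
-- non-'(' survives the reduction iff a closer is already stuck or a prefix balance goes negative
theorem fold_stack_inv (rest : List String) :
    ∀ (pre : List String) (k : Nat), (∀ x ∈ pre, x ≠ "(") →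
      (((rest.foldl count_altStep (pre ++ List.replicate k "(")).any (fun x => x != "(")) = true
        ↔ (pre ≠ [] ∨ negPrefix rest (k : Int) = true)) := by
  induction rest with
  | nil =>
    intro pre k hpre
    simp only [List.foldl_nil, negPrefix, List.any_append, Bool.or_eq_true, List.any_eq_true]
    constructor
    · rintro (⟨x, hx, hne⟩ | ⟨x, hx, hne⟩)
      · exact Or.inl (by rintro rfl; simp at hx)
      · exfalso; have := List.eq_of_mem_replicate hx; subst this; simp at hne
    · rintro (h | h)
      · rcases List.exists_mem_of_ne_nil pre h with ⟨x, hx⟩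
        exact Or.inl ⟨x, hx, by simpa using hpre x hx⟩
      · simp [Bool.false_eq_true] at h
  | cons c rest ih =>
    intro pre k hpre
    by_cases hc : c = "("
    · subst hc
      have hstep : count_altStep (pre ++ List.replicate k "(") "(" =
          pre ++ List.replicate (k + 1) "(" := by
        simp [count_altStep, List.replicate_succ']
      have hb : ¬ ((k : Int) + 1 < 0) := by omega
      simp only [List.foldl_cons, hstep, negPrefix, ih pre (k + 1) hpre,
        Bool.or_eq_true, decide_eq_true_eq]
      push_cast
      simp [hb]
    · rcases Nat.eq_zero_or_pos k with hk | hk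
      · subst hk
        have hlast : pre.getLast? ≠ some "(" := by
          intro h
          exact hpre _ (List.mem_of_mem_getLast? (by simp [h])) rfl
        have hstep : count_altStep (pre ++ List.replicate 0 "(") c =
            (pre ++ [c]) ++ List.replicate 0 "(" := by
          simp [count_altStep, hlast]
        have hpre' : ∀ x ∈ pre ++ [c], x ≠ "(" := by
          intro x hx; rcases List.mem_append.mp hx with h | h
          · exact hpre x h
          · simp at h; subst h; exact hc
        simp only [List.foldl_cons, hstep, negPrefix,
          ih (pre ++ [c]) 0 hpre', Bool.or_eq_true, decide_eq_true_eq]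
        simp [hc]
      · obtain ⟨k', rfl⟩ : ∃ k', k = k' + 1 := ⟨k - 1, by omega⟩
        have hrep : pre ++ List.replicate (k' + 1) "(" =
            (pre ++ List.replicate k' "(") ++ ["("] := by
          simp [List.replicate_succ', List.append_assoc]
        have hstep : count_altStep (pre ++ List.replicate (k' + 1) "(") c =
            pre ++ List.replicate k' "(" := by
          simp [count_altStep, hrep, hc]
        have he : ((k' : Int) + 1) + -1 = (k' : Int) := by ring
        have hk0 : ¬ ((k' : Int) < 0) := by omega
        simp only [List.foldl_cons, hstep, negPrefix,
          ih pre k' hpre, Bool.or_eq_true, decide_eq_true_eq]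
        push_cast
        simp [hk0, hc, he]

-- ===== VERDICT =====
theorem count_spec : Claim_equal_count := by
  intro arr _
  unfold Spec_count count count_alt
  rw [countLoop_eq_negPrefix arr 0 0 le_rfl]
  have h := fold_stack_inv arr [] 0 (by simp)
  simp only [List.append_nil, List.replicate_zero, Nat.cast_zero] at h
  by_cases hn : negPrefix arr 0 = true
  · rw [show (0:Int) - 0 = 0 by ring, if_pos hn, if_pos (h.mpr (Or.inr hn))]
  · have hne : ¬ ((arr.foldl count_altStep []).any (fun x => x != "(") = true) :=
      fun hlt => (h.mp hlt).elim (fun hc => hc rfl) hn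
    rw [show (0:Int) - 0 = 0 by ring, if_neg hn, if_neg hne]
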